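-- pv_equiv track=rewrite | github.com/RaviRanjan742/rag_project | file_processor.py | paragraph_chunk
-- ===== SOURCE A (Python) =====
-- from typing import List
--
-- def paragraph_chunk(text: str) -> List[str]:
--     """Chunk text by paragraphs."""
--     paragraphs = [p.strip() for p in text.split('\n\n') if p.strip()]
--     chunks = []
--     current_chunk = ""
--
--     for paragraph in paragraphs:
--         if len(current_chunk + paragraph) > 800:
--             if current_chunk:
--                 chunks.append(current_chunk.strip())
--             current_chunk = paragraph
--         else:
--             current_chunk += "\n\n" + paragraph if current_chunk else paragraph
--
--     if current_chunk:
--         chunks.append(current_chunk.strip())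
--
--     return chunks
-- ===== SOURCE B (Python) =====
-- from typing import List
--
-- def paragraph_chunk(text: str) -> List[str]:
--     """Chunk text by paragraphs: prefix sums over paragraph lengths, then find
--     each chunk's end with a binary search (the fit predicate is monotone)."""
--     paras = [p.strip() for p in text.split('\n\n') if p.strip()]
--     n = len(paras)
--     pre = [0]          # pre[i] == sum(len(p) + 2 for p in paras[:i])
--     t = 0
--     for p in paras:
--         t += len(p) + 2
--         pre.append(t)
--     chunks = []
--     s = 0
--     while s < n:
--         # largest e in [s+1, n] with pre[e] - pre[s] <= 804 (pre is strictly
--         # increasing, so the predicate is monotone); defaults to s+1.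
--         lo, hi = s + 1, n
--         while lo < hi:
--             mid = (lo + hi + 1) // 2
--             if pre[mid] - pre[s] <= 804:
--                 lo = mid
--             else:
--                 hi = mid - 1
--         e = lo
--         chunks.append('\n\n'.join(paras[s:e]))
--         s = e
--     return chunks
-- ===== Notes on version B (the rewrite author's own statement) =====
-- stated objective: alternative
-- what changed: B precomputes a prefix-sum array of paragraph lengths (+2 for separators) and finds each chunk's end index by binary search over the monotone fit predicate pre[e]-pre[s] <= 804, slicing and joining each group once; A instead grows a string greedily paragraph by paragraph.
import Mathlib
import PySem

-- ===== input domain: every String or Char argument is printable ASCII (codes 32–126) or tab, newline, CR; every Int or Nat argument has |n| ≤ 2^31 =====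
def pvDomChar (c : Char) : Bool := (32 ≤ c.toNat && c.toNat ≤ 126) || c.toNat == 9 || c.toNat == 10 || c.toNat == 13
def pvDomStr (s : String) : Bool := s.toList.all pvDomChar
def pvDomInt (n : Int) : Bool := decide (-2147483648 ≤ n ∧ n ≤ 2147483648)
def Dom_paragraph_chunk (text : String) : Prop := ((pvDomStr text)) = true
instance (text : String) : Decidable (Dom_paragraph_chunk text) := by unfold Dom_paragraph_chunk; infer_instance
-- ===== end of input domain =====

-- B finds each chunk's end index by binary search on a prefix-sum array of paragraph
-- lengths instead of A's greedy paragraph-by-paragraph string growing (alternative algorithm).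


-- shared literal: the separator '\n\n'
def pvNL : List Char := ['\n', '\n']

-- ===== PORT A =====
-- one iteration of A's for-loop: state = (chunks, current_chunk)
def pvStepA (st : List (List Char) × List Char) (p : List Char) : List (List Char) × List Char :=
  if 800 < (st.2 ++ p).length then
    (if st.2 ≠ [] then st.1 ++ [PySem.Chars.strip st.2] else st.1, p)
  else
    (st.1, if st.2 ≠ [] then st.2 ++ pvNL ++ p else p)

def paragraph_chunk (text : String) : List String :=
  let paragraphs := ((PySem.Chars.splitOn text.toList pvNL).map PySem.Chars.strip).filter (· ≠ [])
  let st := paragraphs.foldl pvStepA ([], [])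
  (if st.2 ≠ [] then st.1 ++ [PySem.Chars.strip st.2] else st.1).map (fun cs => String.ofList cs)

-- ===== PORT B =====
-- the prefix-sum list: pre[i] = sum of (len(p)+2) over paras[:i]  (Source B's first loop)
def pvPre (paras : List (List Char)) : List Int :=
  (paras.foldl (fun (st : List Int × Int) p =>
      (st.1 ++ [st.2 + p.length + 2], st.2 + p.length + 2)) ([0], 0)).1

-- Source B's inner while-loop: binary search for the largest e in [lo,hi] with pre[e]-base ≤ 804
-- (structural recursion on a fuel ≥ hi-lo, which the callers supply; pre[mid] is always in
-- range here, so getD is exact)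
def pvBsAux (pre : List Int) (base : Int) : Nat → Nat → Nat → Nat
  | 0, lo, _ => lo
  | fuel + 1, lo, hi =>
    if lo < hi then
      if pre.getD ((lo + hi + 1) / 2) 0 - base ≤ 804 then pvBsAux pre base fuel ((lo + hi + 1) / 2) hi
      else pvBsAux pre base fuel lo ((lo + hi + 1) / 2 - 1)
    else lo

-- Source B's outer while-loop over chunk start indices (fuel ≥ n - s at every call);
-- paras[s:e] = (drop s).take (e-s) (exact for 0 ≤ s ≤ e)
def pvOuter (paras : List (List Char)) (pre : List Int) (n : Nat) : Nat → Nat → List (List Char)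
  | 0, _ => []
  | fuel + 1, s =>
    if s < n then
      PySem.Chars.join pvNL ((paras.drop s).take (pvBsAux pre (pre.getD s 0) (n - (s + 1)) (s + 1) n - s))
        :: pvOuter paras pre n fuel (pvBsAux pre (pre.getD s 0) (n - (s + 1)) (s + 1) n)
    else []

def paragraph_chunk_alt (text : String) : List String :=
  let paras := ((PySem.Chars.splitOn text.toList pvNL).map PySem.Chars.strip).filter (· ≠ [])
  (pvOuter paras (pvPre paras) paras.length paras.length 0).map (fun cs => String.ofList cs)

-- ===== PRECONDITION & SPEC =====
def Spec_paragraph_chunk (text : String) (out : List String) : Prop := out = paragraph_chunk_alt text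
instance (text : String) (out : List String) : Decidable (Spec_paragraph_chunk text out) := by unfold Spec_paragraph_chunk; infer_instance

-- ===== CLAIM (what is proved, stated in full; the proofs are below) =====
def Claim_equal_paragraph_chunk : Prop := ∀ (text : String), Dom_paragraph_chunk text → Spec_paragraph_chunk text (paragraph_chunk text)

-- ===== LEMMAS AND PROOFS =====

-- a paragraph as both programs carry it: nonempty and fixed by both one-sided strips
def pvGood (cs : List Char) : Prop :=
  cs ≠ [] ∧ PySem.Chars.lstrip cs = cs ∧ PySem.Chars.rstrip cs = cs

lemma pv_dropWhile_head_false {q : Char → Bool} {c : Char} {cs : List Char}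
    (h : List.dropWhile q (c :: cs) = c :: cs) : q c = false := by
  cases hq : q c with
  | false => rfl
  | true =>
    exfalso
    rw [List.dropWhile_cons, hq, if_pos rfl] at h
    have h1 := List.length_dropWhile_le q cs
    have h2 := congrArg List.length h
    simp only [List.length_cons] at h2
    omega

lemma pv_dropWhile_append {q : Char → Bool} {x y : List Char}
    (hx : List.dropWhile q x = x) (hne : x ≠ []) :
    List.dropWhile q (x ++ y) = x ++ y := by
  cases x with
  | nil => exact absurd rfl hne
  | cons c cs =>
    simp [pv_dropWhile_head_false hx]

lemma pv_dropWhile_idem (q : Char → Bool) (l : List Char) :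
    List.dropWhile q (List.dropWhile q l) = List.dropWhile q l := by
  induction l with
  | nil => simp
  | cons c cs ih =>
    by_cases hc : q c
    · simp [hc, ih]
    · simp [hc]

lemma pv_lstrip_append {a b : List Char}
    (ha : PySem.Chars.lstrip a = a) (hane : a ≠ []) :
    PySem.Chars.lstrip (a ++ b) = a ++ b :=
  pv_dropWhile_append ha hane

lemma pv_rstrip_append {a b : List Char}
    (hb : PySem.Chars.rstrip b = b) (hbne : b ≠ []) :
    PySem.Chars.rstrip (a ++ b) = a ++ b := by
  have hbr : List.dropWhile PySem.Chars.isspace b.reverse = b.reverse := by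
    have h1 : (List.dropWhile PySem.Chars.isspace b.reverse).reverse = b := hb
    rw [← List.reverse_reverse (List.dropWhile PySem.Chars.isspace b.reverse), h1]
  show (List.dropWhile _ _).reverse = _
  rw [List.reverse_append, pv_dropWhile_append hbr (by simpa using hbne)]
  simp

lemma pv_good_append {a b : List Char} (ha : pvGood a) (hb : pvGood b) :
    pvGood (a ++ pvNL ++ b) := by
  obtain ⟨hane, hal, har⟩ := ha
  obtain ⟨hbne, hbl, hbr⟩ := hb
  refine ⟨by simp [hane], ?_, ?_⟩
  · rw [List.append_assoc]
    exact pv_lstrip_append hal hane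
  · rw [List.append_assoc]
    rw [show a ++ (pvNL ++ b) = (a ++ pvNL) ++ b from (List.append_assoc a pvNL b).symm]
    exact pv_rstrip_append hbr hbne

lemma pv_good_strip {q : List Char} (h : PySem.Chars.strip q ≠ []) :
    pvGood (PySem.Chars.strip q) := by
  refine ⟨h, ?_, ?_⟩
  · have hww : List.dropWhile PySem.Chars.isspace (List.dropWhile PySem.Chars.isspace q)
        = List.dropWhile PySem.Chars.isspace q := pv_dropWhile_idem _ q
    obtain ⟨t, ht⟩ := List.dropWhile_suffix (l := (List.dropWhile PySem.Chars.isspace q).reverse)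
      PySem.Chars.isspace
    have hw2 : List.dropWhile PySem.Chars.isspace q
        = PySem.Chars.strip q ++ t.reverse := by
      conv_lhs => rw [← List.reverse_reverse (List.dropWhile PySem.Chars.isspace q), ← ht]
      rw [List.reverse_append]
      rfl
    cases hy : PySem.Chars.strip q with
    | nil => exact absurd hy h
    | cons c ys =>
      have hwc : List.dropWhile PySem.Chars.isspace q = c :: (ys ++ t.reverse) := by
        rw [hw2, hy]; simp
      have hcf : PySem.Chars.isspace c = false := by
        apply pv_dropWhile_head_false (cs := ys ++ t.reverse)
        rw [← hwc]; exact hww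
      show List.dropWhile _ _ = _
      simp [hcf]
  · show (List.dropWhile _ ((List.dropWhile PySem.Chars.isspace
      ((List.dropWhile PySem.Chars.isspace q).reverse)).reverse).reverse).reverse = _
    rw [List.reverse_reverse, pv_dropWhile_idem]
    rfl

lemma pv_good_join {gs : List (List Char)} (hgs : ∀ g ∈ gs, pvGood g) (hne : gs ≠ []) :
    pvGood (PySem.Chars.join pvNL gs) := by
  induction gs with
  | nil => exact absurd rfl hne
  | cons a t ih =>
    cases t with
    | nil => rw [PySem.Chars.join_singleton]; exact hgs a (by simp)
    | cons b t' =>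
      rw [PySem.Chars.join_cons_cons]
      exact pv_good_append (hgs a (by simp))
        (ih (fun g hg => hgs g (List.mem_cons_of_mem _ hg)) (by simp))

lemma pv_join_append_singleton {g : List (List Char)} (p : List Char) (hne : g ≠ []) :
    PySem.Chars.join pvNL (g ++ [p]) = PySem.Chars.join pvNL g ++ pvNL ++ p := by
  induction g with
  | nil => exact absurd rfl hne
  | cons a t ih =>
    cases t with
    | nil => simp [PySem.Chars.join_singleton, PySem.Chars.join_cons_cons]
    | cons b t' =>
      have ih' := ih (by simp)
      simp only [List.cons_append] at ih' ⊢
      rw [PySem.Chars.join_cons_cons, PySem.Chars.join_cons_cons, ih']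
      simp

lemma pv_good_strip_self {a : List Char} (h : pvGood a) : PySem.Chars.strip a = a := by
  obtain ⟨-, hl, hr⟩ := h
  show PySem.Chars.rstrip (PySem.Chars.lstrip a) = a
  rw [hl, hr]

lemma pv_paras_good (text : String) :
    ∀ p ∈ ((PySem.Chars.splitOn text.toList pvNL).map PySem.Chars.strip).filter (· ≠ []),
      pvGood p := by
  intro p hp
  rw [List.mem_filter] at hp
  obtain ⟨hmem, hne⟩ := hp
  obtain ⟨q, -, rfl⟩ := List.mem_map.mp hmem
  exact pv_good_strip (by simpa using hne)

-- the greedy grouping of paragraphs both programs compute, as a recursion on the list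
def pvGr : List (List Char) → List (List Char) → List (List (List Char))
  | g, [] => if g = [] then [] else [g]
  | g, p :: ps =>
      if g = [] then pvGr [p] ps
      else if 800 < (PySem.Chars.join pvNL g).length + p.length then g :: pvGr [p] ps
      else pvGr (g ++ [p]) ps

-- A's fold equals the greedy grouping, joined
lemma pv_mainA : ∀ (ps cs : List (List Char)) (g : List (List Char)),
    (∀ p ∈ ps, pvGood p) → (∀ x ∈ g, pvGood x) →
    (let st := ps.foldl pvStepA (cs, PySem.Chars.join pvNL g)
     if st.2 ≠ [] then st.1 ++ [PySem.Chars.strip st.2] else st.1)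
    = cs ++ (pvGr g ps).map (PySem.Chars.join pvNL) := by
  intro ps
  induction ps with
  | nil =>
    intro cs g _ hg
    simp only [List.foldl_nil]
    by_cases hgnil : g = []
    · subst hgnil
      simp [PySem.Chars.join_nil, pvGr]
    · have hj : pvGood (PySem.Chars.join pvNL g) := pv_good_join hg hgnil
      simp [hj.1, pv_good_strip_self hj, pvGr, hgnil]
  | cons p ps ih =>
    intro cs g hps hg
    have hp : pvGood p := hps p (by simp)
    have hps' : ∀ q ∈ ps, pvGood q := fun q hq => hps q (List.mem_cons_of_mem _ hq)
    simp only [List.foldl_cons]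
    by_cases hgnil : g = []
    · subst hgnil
      have hA : pvStepA (cs, PySem.Chars.join pvNL []) p = (cs, PySem.Chars.join pvNL [p]) := by
        simp [pvStepA, PySem.Chars.join_nil, PySem.Chars.join_singleton]
      rw [hA]
      rw [show pvGr [] (p :: ps) = pvGr [p] ps from by simp [pvGr]]
      exact ih cs [p] hps' (by simpa using hp)
    · have hj : pvGood (PySem.Chars.join pvNL g) := pv_good_join hg hgnil
      by_cases hcond : 800 < (PySem.Chars.join pvNL g).length + p.length
      · have hA : pvStepA (cs, PySem.Chars.join pvNL g) p
            = (cs ++ [PySem.Chars.join pvNL g], PySem.Chars.join pvNL [p]) := by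
          simp [pvStepA, List.length_append, hcond, hj.1, pv_good_strip_self hj,
            PySem.Chars.join_singleton]
        rw [hA]
        rw [show pvGr g (p :: ps) = g :: pvGr [p] ps from by simp [pvGr, hgnil, hcond]]
        rw [ih (cs ++ [PySem.Chars.join pvNL g]) [p] hps' (by simpa using hp)]
        simp
      · have hA : pvStepA (cs, PySem.Chars.join pvNL g) p
            = (cs, PySem.Chars.join pvNL (g ++ [p])) := by
          simp [pvStepA, List.length_append, hcond, hj.1, pv_join_append_singleton p hgnil]
        rw [hA]
        rw [show pvGr g (p :: ps) = pvGr (g ++ [p]) ps from by simp [pvGr, hgnil, hcond]]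
        refine ih cs (g ++ [p]) hps' ?_
        intro x hx
        rcases List.mem_append.mp hx with h1 | h1
        · exact hg x h1
        · simpa [List.mem_singleton.mp h1] using hp

-- ideal prefix sums: pvP paras i = sum of (len p + 2) over paras[:i]
def pvP (paras : List (List Char)) (i : Nat) : Int :=
  ((paras.take i).map (fun p => (p.length : Int) + 2)).sum

lemma pvP_cons (p : List Char) (l : List (List Char)) (k : Nat) :
    pvP (p :: l) (k + 1) = (p.length : Int) + 2 + pvP l k := by
  simp [pvP]

lemma pvP_succ (paras : List (List Char)) (i : Nat) (h : i < paras.length) :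
    pvP paras (i + 1) = pvP paras i + ((paras[i].length : Int) + 2) := by
  unfold pvP
  rw [List.take_add_one, List.getElem?_eq_getElem h, List.map_append, List.sum_append]
  simp

lemma pv_slice_sum0 (paras : List (List Char)) (s m : Nat) (hs : s ≤ m) (_hm : m ≤ paras.length) :
    (((paras.drop s).take (m - s)).map (fun p => (p.length : Int) + 2)).sum
      = pvP paras m - pvP paras s := by
  have h1 : paras.take m = paras.take s ++ (paras.drop s).take (m - s) := by
    conv_lhs => rw [show m = s + (m - s) from by omega]
    rw [List.take_add]
  unfold pvP
  rw [h1]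
  simp [List.map_append, List.sum_append]

lemma pvP_mono (paras : List (List Char)) {i j : Nat} (hij : i ≤ j) (hj : j ≤ paras.length) :
    pvP paras i ≤ pvP paras j := by
  have h := pv_slice_sum0 paras i j hij hj
  have h2 : (0 : Int) ≤ (((paras.drop i).take (j - i)).map (fun p => (p.length : Int) + 2)).sum := by
    apply List.sum_nonneg
    intro x hx
    obtain ⟨p, -, rfl⟩ := List.mem_map.mp hx
    positivity
  omega

-- the built pre list is the ideal prefix-sum table
lemma pvPre_fold (l : List (List Char)) : ∀ (acc : List Int) (t : Int),
    l.foldl (fun (st : List Int × Int) p =>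
        (st.1 ++ [st.2 + p.length + 2], st.2 + p.length + 2)) (acc, t)
    = (acc ++ (List.range l.length).map (fun k => t + pvP l (k + 1)), t + pvP l l.length) := by
  induction l with
  | nil => intro acc t; simp [pvP]
  | cons p l ih =>
    intro acc t
    simp only [List.foldl_cons]
    rw [ih]
    refine Prod.ext ?_ ?_
    · show acc ++ [t + ↑p.length + 2] ++ _ = acc ++ _
      rw [List.append_assoc]
      congr 1
      rw [List.length_cons, List.range_succ_eq_map, List.map_cons, List.map_map,
        List.singleton_append]
      congr 1
      · show t + ↑p.length + 2 = t + pvP (p :: l) (0 + 1)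
        rw [show (0 : Nat) + 1 = 0 + 1 from rfl, pvP_cons]
        simp [pvP]
        ring
      · apply List.map_congr_left
        intro k _
        simp only [Function.comp_apply]
        rw [pvP_cons]
        ring
    · show t + ↑p.length + 2 + pvP l l.length = t + pvP (p :: l) (l.length + 1)
      rw [pvP_cons]; ring

lemma pvPre_getD (paras : List (List Char)) (i : Nat) (h : i ≤ paras.length) :
    (pvPre paras).getD i 0 = pvP paras i := by
  unfold pvPre
  rw [pvPre_fold]
  cases i with
  | zero => simp [pvP]
  | succ k =>
    have hk : k < paras.length := by omega
    rw [List.singleton_append, List.getD_cons_succ]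
    rw [List.getD_eq_getElem?_getD, List.getElem?_map, List.getElem?_range hk]
    simp

-- characterisation of the binary search
lemma pvBs_spec (pre : List Int) (base : Int) (n : Nat)
    (hmono : ∀ i j : Nat, i ≤ j → j ≤ n → pre.getD j 0 - base ≤ 804 → pre.getD i 0 - base ≤ 804) :
    ∀ (k lo hi : Nat), hi - lo ≤ k → lo ≤ hi → hi ≤ n →
    lo ≤ pvBsAux pre base k lo hi ∧ pvBsAux pre base k lo hi ≤ hi ∧
    (∀ e, lo < e → e ≤ pvBsAux pre base k lo hi → pre.getD e 0 - base ≤ 804) ∧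
    (pvBsAux pre base k lo hi < hi → ¬ pre.getD (pvBsAux pre base k lo hi + 1) 0 - base ≤ 804) := by
  intro k
  induction k with
  | zero =>
    intro lo hi hk hle hn
    have heq : lo = hi := by omega
    subst heq
    simp only [pvBsAux]
    refine ⟨le_rfl, le_rfl, by intro e h1 h2; omega, by intro h1; omega⟩
  | succ k ih =>
    intro lo hi hk hle hn
    by_cases hlt : lo < hi
    · have hmid1 : lo < (lo + hi + 1) / 2 := by omega
      have hmid2 : (lo + hi + 1) / 2 ≤ hi := by omega
      simp only [pvBsAux]
      rw [if_pos hlt]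
      by_cases hq : pre.getD ((lo + hi + 1) / 2) 0 - base ≤ 804
      · rw [if_pos hq]
        obtain ⟨h1, h2, h3, h4⟩ := ih ((lo + hi + 1) / 2) hi (by omega) (by omega) hn
        refine ⟨by omega, h2, ?_, h4⟩
        intro e he1 he2
        by_cases hcmp : (lo + hi + 1) / 2 < e
        · exact h3 e hcmp he2
        · exact hmono e ((lo + hi + 1) / 2) (by omega) (by omega) hq
      · rw [if_neg hq]
        obtain ⟨h1, h2, h3, h4⟩ := ih lo ((lo + hi + 1) / 2 - 1) (by omega) (by omega) (by omega)
        refine ⟨h1, by omega, h3, ?_⟩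
        intro hr
        by_cases hcmp : pvBsAux pre base k lo ((lo + hi + 1) / 2 - 1) < (lo + hi + 1) / 2 - 1
        · exact h4 hcmp
        · have heq : pvBsAux pre base k lo ((lo + hi + 1) / 2 - 1) + 1 = (lo + hi + 1) / 2 := by
            omega
          rw [heq]
          exact hq
    · simp only [pvBsAux]
      rw [if_neg hlt]
      refine ⟨le_rfl, hle, by intro e h1 h2; omega, fun h1 => absurd h1 hlt⟩

-- joined length of a nonempty group of paragraphs
lemma pv_join_length (g : List (List Char)) (hne : g ≠ []) :
    ((PySem.Chars.join pvNL g).length : Int)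
      = (g.map (fun p => (p.length : Int) + 2)).sum - 2 := by
  induction g with
  | nil => exact absurd rfl hne
  | cons a t ih =>
    cases t with
    | nil => simp [PySem.Chars.join_singleton]
    | cons b t' =>
      rw [PySem.Chars.join_cons_cons]
      have ih' := ih (by simp)
      simp only [List.map_cons, List.sum_cons] at ih' ⊢
      simp only [List.length_append]
      push_cast
      rw [show ((pvNL.length : Int)) = 2 from by simp [pvNL]] at *
      omega

lemma pv_slice_sum (paras : List (List Char)) (s m : Nat) (hs : s ≤ m) (hm : m ≤ paras.length) :
    (((paras.drop s).take (m - s)).map (fun p => (p.length : Int) + 2)).sum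
      = pvP paras m - pvP paras s := pv_slice_sum0 paras s m hs hm

lemma pv_slice_len (paras : List (List Char)) (s m : Nat) (hm : m ≤ paras.length) :
    ((paras.drop s).take (m - s)).length = m - s := by
  simp [List.length_take, List.length_drop]
  omega

lemma pv_slice_ne (paras : List (List Char)) (s m : Nat) (h1 : s < m) (hm : m ≤ paras.length) :
    (paras.drop s).take (m - s) ≠ [] := by
  intro h
  have := pv_slice_len paras s m hm
  rw [h] at this
  simp at this
  omega

lemma pv_slice_join_len (paras : List (List Char)) (s m : Nat)
    (h1 : s < m) (h2 : m ≤ paras.length) :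
    ((PySem.Chars.join pvNL ((paras.drop s).take (m - s))).length : Int)
      = pvP paras m - pvP paras s - 2 := by
  rw [pv_join_length _ (pv_slice_ne paras s m h1 h2), pv_slice_sum paras s m (le_of_lt h1) h2]

lemma pv_slice_snoc (paras : List (List Char)) (s m : Nat) (hs : s ≤ m) (hm : m < paras.length) :
    (paras.drop s).take (m - s) ++ [paras[m]] = (paras.drop s).take (m + 1 - s) := by
  rw [show m + 1 - s = (m - s) + 1 from by omega, List.take_add_one]
  have hg : (paras.drop s)[m - s]? = some paras[m] := by
    rw [List.getElem?_drop, show s + (m - s) = m from by omega, List.getElem?_eq_getElem hm]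
  rw [hg]
  simp

-- final flush of the greedy grouping at the stop index r
lemma pv_grFinal (paras : List (List Char)) (s r : Nat) (h2 : s < r) (hr : r ≤ paras.length)
    (hstop : r < paras.length → ¬ pvP paras (r + 1) - pvP paras s ≤ 804) :
    pvGr ((paras.drop s).take (r - s)) (paras.drop r)
      = (paras.drop s).take (r - s) :: pvGr [] (paras.drop r) := by
  have hgne := pv_slice_ne paras s r h2 hr
  by_cases hrn : r < paras.length
  · rw [List.drop_eq_getElem_cons hrn]
    have hcond : 800 < (PySem.Chars.join pvNL ((paras.drop s).take (r - s))).length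
        + paras[r].length := by
      have e1 := pv_slice_join_len paras s r h2 hr
      have e2 := pvP_succ paras r hrn
      have e3 := hstop hrn
      omega
    rw [show pvGr ((paras.drop s).take (r - s)) (paras[r] :: paras.drop (r + 1))
        = (paras.drop s).take (r - s) :: pvGr [paras[r]] (paras.drop (r + 1)) from by
      simp [pvGr, hgne, hcond]]
    rw [show pvGr [] (paras[r] :: paras.drop (r + 1)) = pvGr [paras[r]] (paras.drop (r + 1))
      from by simp [pvGr]]
  · have heq : r = paras.length := by omega
    rw [heq, List.drop_length]
    simp [pvGr]
    omega

-- extending the current group up to the stop index r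
lemma pv_grSlice (paras : List (List Char)) (s r : Nat) (hr : r ≤ paras.length)
    (hQ : ∀ e, s + 1 < e → e ≤ r → pvP paras e - pvP paras s ≤ 804)
    (hstop : r < paras.length → ¬ pvP paras (r + 1) - pvP paras s ≤ 804) :
    ∀ (j m : Nat), r - m ≤ j → s < m → m ≤ r →
    pvGr ((paras.drop s).take (m - s)) (paras.drop m)
      = (paras.drop s).take (r - s) :: pvGr [] (paras.drop r) := by
  intro j
  induction j with
  | zero =>
    intro m h1 h2 h3
    have heq : m = r := by omega
    subst heq
    exact pv_grFinal paras s m h2 hr hstop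
  | succ j ih =>
    intro m h1 h2 h3
    by_cases hmr : m = r
    · subst hmr
      exact pv_grFinal paras s m h2 hr hstop
    · have hmlt : m < r := by omega
      have hmn : m < paras.length := by omega
      have hgne := pv_slice_ne paras s m h2 (by omega)
      have hfits : ¬ 800 < (PySem.Chars.join pvNL ((paras.drop s).take (m - s))).length
          + paras[m].length := by
        have e1 := pv_slice_join_len paras s m h2 (by omega)
        have e2 := pvP_succ paras m hmn
        have e3 := hQ (m + 1) (by omega) (by omega)
        omega
      rw [List.drop_eq_getElem_cons hmn]
      rw [show pvGr ((paras.drop s).take (m - s)) (paras[m] :: paras.drop (m + 1))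
          = pvGr ((paras.drop s).take (m - s) ++ [paras[m]]) (paras.drop (m + 1)) from by
        simp [pvGr, hgne, hfits]]
      rw [pv_slice_snoc paras s m (by omega) hmn]
      exact ih (m + 1) (by omega) (by omega) (by omega)

-- B's outer loop equals the greedy grouping, joined
lemma pv_outer_eq (paras : List (List Char)) :
    ∀ (j s : Nat), paras.length - s ≤ j →
    pvOuter paras (pvPre paras) paras.length j s
      = (pvGr [] (paras.drop s)).map (PySem.Chars.join pvNL) := by
  intro j
  induction j with
  | zero =>
    intro s h
    rw [List.drop_eq_nil_of_le (by omega)]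
    simp [pvOuter, pvGr]
  | succ j ih =>
    intro s h
    by_cases hs : s < paras.length
    · simp only [pvOuter]
      rw [if_pos hs]
      have hmono : ∀ i j : Nat, i ≤ j → j ≤ paras.length →
          (pvPre paras).getD j 0 - (pvPre paras).getD s 0 ≤ 804 →
          (pvPre paras).getD i 0 - (pvPre paras).getD s 0 ≤ 804 := by
        intro i j hij hj hQ
        rw [pvPre_getD paras j hj] at hQ
        rw [pvPre_getD paras i (by omega)]
        have := pvP_mono paras hij hj
        omega
      obtain ⟨hge, hle, hQ, hstop⟩ := pvBs_spec (pvPre paras) ((pvPre paras).getD s 0)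
        paras.length hmono (paras.length - (s + 1)) (s + 1) paras.length (le_refl _)
        (by omega) (le_refl _)
      set e := pvBsAux (pvPre paras) ((pvPre paras).getD s 0) (paras.length - (s + 1)) (s + 1)
        paras.length with he
      have hQ' : ∀ e', s + 1 < e' → e' ≤ e → pvP paras e' - pvP paras s ≤ 804 := by
        intro e' he1 he2
        have hq := hQ e' he1 he2
        rw [pvPre_getD paras e' (by omega), pvPre_getD paras s (by omega)] at hq
        exact hq
      have hstop' : e < paras.length → ¬ pvP paras (e + 1) - pvP paras s ≤ 804 := by
        intro hlt
        have hq := hstop hlt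
        rw [pvPre_getD paras (e + 1) (by omega), pvPre_getD paras s (by omega)] at hq
        exact hq
      rw [show paras.drop s = paras[s] :: paras.drop (s + 1) from List.drop_eq_getElem_cons hs]
      rw [show pvGr [] (paras[s] :: paras.drop (s + 1)) = pvGr [paras[s]] (paras.drop (s + 1))
        from by simp [pvGr]]
      rw [show [paras[s]] = (paras.drop s).take (s + 1 - s) from by
        have := pv_slice_snoc paras s s (le_refl s) hs
        simpa using this]
      rw [pv_grSlice paras s e hle hQ' hstop' (e - (s + 1)) (s + 1) (by omega) (by omega) hge]
      rw [List.map_cons]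
      rw [ih e (by omega)]
      rw [← List.drop_eq_getElem_cons hs]
    · simp only [pvOuter]
      rw [if_neg hs, List.drop_eq_nil_of_le (by omega)]
      simp [pvGr]

-- ===== VERDICT (by name: the statement is the Claim_ definition above) =====
theorem paragraph_chunk_spec : Claim_equal_paragraph_chunk := by
  intro text _
  show _ = _
  unfold paragraph_chunk paragraph_chunk_alt
  have hA := pv_mainA
    (((PySem.Chars.splitOn text.toList pvNL).map PySem.Chars.strip).filter (· ≠ []))
    [] [] (pv_paras_good text) (by simp)
  simp only [PySem.Chars.join_nil, List.nil_append] at hA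
  have hB := pv_outer_eq
    (((PySem.Chars.splitOn text.toList pvNL).map PySem.Chars.strip).filter (· ≠ []))
    ((((PySem.Chars.splitOn text.toList pvNL).map PySem.Chars.strip).filter (· ≠ [])).length)
    0 (by omega)
  simp only [List.drop_zero] at hB
  simp only []
  rw [hA, hB]
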